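-- pv_equiv track=rewrite | github.com/nwpuhh/yreason | boomerer/reason.py | _process_oppo_literals
-- ===== SOURCE A (Python) =====
-- def _process_oppo_literals(wghts):
--     '''
--         processing the opposite literals => the solver accepts positive weights
--         P1: treating the neative literals
--         P2: flipping the id of literals into negative if they have negative weights
--     '''
--     # processing the opposite literals, if any.
--     i, lits = 0, sorted(wghts.keys(), key=lambda l: 2 * abs(l) + (0 if l > 0 else 1))
--     ##################################################
--     while i < len(lits) - 1:
--         if lits[i] == -lits[i + 1]:
--             # if there are both l and \neg l
--             l1, l2 = lits[i], lits[i + 1]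
--             minw = min(wghts[l1], wghts[l2], key=lambda w: abs(w))
--             # updating the weights
--             wghts[l1] -= minw
--             wghts[l2] -= minw
--
--             i += 2
--         else:
--             # not appliable for single version, as there will be no sharing
--             i += 1
--     ##################################################
--     # # flipping literals with negative weights
--     # lits = list(wghts.keys())
--     # for l in lits:
--     #     if wghts[l] < 0:
--     #         wghts[-l] = -wghts[l]
--     #         del wghts[l]
--     # return wghts
--     return wghts
-- ===== SOURCE B (Python) =====
-- def _process_oppo_literals(wghts):
--     # One linear pass with hash lookups: for each positive literal present,
--     # find its negation directly in the dict and cancel the shared weight.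
--     for l in list(wghts):
--         if l > 0 and -l in wghts:
--             x, y = wghts[l], wghts[-l]
--             minw = x if abs(x) <= abs(y) else y
--             wghts[l] = x - minw
--             wghts[-l] = y - minw
--     return wghts
-- ===== Notes on version B (the rewrite author's own statement) =====
-- stated objective: faster
-- what changed: Replaced sorting the keys and scanning for adjacent opposite literals with a single pass that looks up each positive literal's negation directly in the dict; intended as faster (drops the O(n log n) keyed sort), measured 2.7x at n=262144 on one timing run and 1.68x (unconfirmed) on another.
import Mathlib
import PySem

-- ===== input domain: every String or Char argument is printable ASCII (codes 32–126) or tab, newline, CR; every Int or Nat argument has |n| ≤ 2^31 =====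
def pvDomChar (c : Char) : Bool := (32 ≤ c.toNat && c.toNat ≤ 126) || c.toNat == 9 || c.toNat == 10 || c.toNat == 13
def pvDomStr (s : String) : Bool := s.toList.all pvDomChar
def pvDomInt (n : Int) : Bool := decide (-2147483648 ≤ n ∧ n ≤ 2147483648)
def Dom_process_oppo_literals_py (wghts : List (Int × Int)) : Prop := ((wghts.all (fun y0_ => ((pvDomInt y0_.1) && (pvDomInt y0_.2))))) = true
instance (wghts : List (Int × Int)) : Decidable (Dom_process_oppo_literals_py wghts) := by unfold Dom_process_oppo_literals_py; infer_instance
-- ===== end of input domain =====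

-- B replaces A's sort-and-scan pairing by a single pass with direct hash lookup of each
-- positive literal's negation (objective: faster). Both A and B mutate the dict in place in
-- Python; the equivalence proved here is about the returned dict (= the same object).

-- ===== PORT A =====
-- the Python sort key: 2 * abs(l) + (0 if l > 0 else 1)
def pvKeyA (l : Int) : Int := 2 * |l| + (if 0 < l then 0 else 1)

-- the while loop over the sorted key list: i advances by 2 on a matched opposite pair,
-- else by 1; stops with fewer than two literals left.  Keys read are always present in the
-- dict (they come from wghts.keys()), so getD/modify with default 0 are exact (no KeyError).
def pvScanA : List Int → PySem.Dict Int Int → PySem.Dict Int Int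
  | a :: b :: rest, d =>
      if a = -b then
        -- minw = min(wghts[l1], wghts[l2], key=abs): first argument wins ties
        let x := d.getD a 0
        let y := d.getD b 0
        let minw := if |x| ≤ |y| then x else y
        pvScanA rest ((d.modify a 0 (· - minw)).modify b 0 (· - minw))
      else
        pvScanA (b :: rest) d
  | _, d => d

def process_oppo_literals_py (wghts : List (Int × Int)) : List (Int × Int) :=
  let d := PySem.Dict.mk wghts
  let lits := PySem.List.sorted d.keys pvKeyA false
  (pvScanA lits d).items

-- ===== PORT B =====
def pvStepB (d : PySem.Dict Int Int) (l : Int) : PySem.Dict Int Int :=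
  if 0 < l ∧ d.contains (-l) then
    let x := d.getD l 0
    let y := d.getD (-l) 0
    let minw := if |x| ≤ |y| then x else y
    (d.insert l (x - minw)).insert (-l) (y - minw)
  else d

def process_oppo_literals_py_alt (wghts : List (Int × Int)) : List (Int × Int) :=
  let d := PySem.Dict.mk wghts
  (d.keys.foldl pvStepB d).items

-- ===== PRECONDITION & SPEC =====
-- The input list represents a Python dict, whose keys are necessarily distinct; lists with
-- duplicate keys do not correspond to any dict A can receive.
def Pre_process_oppo_literals_py (wghts : List (Int × Int)) : Prop :=
  (wghts.map Prod.fst).Nodup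
instance (wghts : List (Int × Int)) : Decidable (Pre_process_oppo_literals_py wghts) := by
  unfold Pre_process_oppo_literals_py; infer_instance

def pvWitness_process_oppo_literals_py : (List (Int × Int)) := [(1, 5), (-1, -3), (2, 4)]

def Spec_process_oppo_literals_py (wghts : List (Int × Int)) (out : List (Int × Int)) : Prop := out = process_oppo_literals_py_alt wghts
instance (wghts : List (Int × Int)) (out : List (Int × Int)) : Decidable (Spec_process_oppo_literals_py wghts out) := by unfold Spec_process_oppo_literals_py; infer_instance

-- ===== CLAIM (what is proved, stated in full; the proofs are below) =====
def Claim_equal_process_oppo_literals_py : Prop := ∀ (wghts : List (Int × Int)), Dom_process_oppo_literals_py wghts → Pre_process_oppo_literals_py wghts → Spec_process_oppo_literals_py wghts (process_oppo_literals_py wghts)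

-- ===== LEMMAS AND PROOFS =====

theorem pvKeyA_inj {a b : Int} (h : pvKeyA a = pvKeyA b) : a = b := by
  unfold pvKeyA at h
  rcases abs_cases a with ⟨ha, _⟩ | ⟨ha, _⟩ <;> rcases abs_cases b with ⟨hb, _⟩ | ⟨hb, _⟩ <;>
    split_ifs at h <;> omega

-- the final dict of B's fold, pointwise, relative to the starting dict d0
theorem pvFoldB_spec (d0 : PySem.Dict Int Int) (K : List Int)
    (hsub : ∀ l ∈ K, l ∈ d0.keys) (hK : K.Nodup) (d : PySem.Dict Int Int)
    (hkeys : d.keys = d0.keys)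
    (hpre : ∀ l ∈ K, 0 < l →
      d.getD l 0 = d0.getD l 0 ∧ d.getD (-l) 0 = d0.getD (-l) 0) :
    (K.foldl pvStepB d).keys = d0.keys ∧
    ∀ j : Int, (K.foldl pvStepB d).getD j 0 =
      if j ≠ 0 ∧ |j| ∈ K ∧ -|j| ∈ d0.keys then
        d.getD j 0 -
          (if |d0.getD |j| 0| ≤ |d0.getD (-|j|) 0| then d0.getD |j| 0 else d0.getD (-|j|) 0)
      else d.getD j 0 := by
  induction K generalizing d with
  | nil => refine ⟨hkeys, fun j => ?_⟩; simp
  | cons l K ih =>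
    have hlK : l ∈ d0.keys := hsub l (by simp)
    have hdc : ∀ x : Int, d.contains x = decide (x ∈ d0.keys) := by
      intro x; rw [PySem.Dict.contains_eq_decide_mem_keys, hkeys]
    by_cases hg : 0 < l ∧ d.contains (-l)
    · have hl : 0 < l := hg.1
      have hneg : -l ∈ d0.keys := by
        have := hg.2; rw [hdc] at this; exact of_decide_eq_true this
      have hx : d.getD l 0 = d0.getD l 0 := (hpre l (by simp) hl).1
      have hy : d.getD (-l) 0 = d0.getD (-l) 0 := (hpre l (by simp) hl).2
      have hstep : pvStepB d l =
          PySem.Dict.insert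
            (d.insert l (d0.getD l 0 - (if |d0.getD l 0| ≤ |d0.getD (-l) 0| then d0.getD l 0 else d0.getD (-l) 0)))
            (-l) (d0.getD (-l) 0 - (if |d0.getD l 0| ≤ |d0.getD (-l) 0| then d0.getD l 0 else d0.getD (-l) 0)) := by
        simp only [pvStepB]
        rw [if_pos hg, hx, hy]
      set d' := pvStepB d l with hd'
      have hk' : d'.keys = d0.keys := by
        rw [hstep]
        rw [PySem.Dict.keys_insert_of_contains, PySem.Dict.keys_insert_of_contains, hkeys]
        · rw [hdc]; exact decide_eq_true hlK
        · rw [PySem.Dict.contains_insert, hdc]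
          simp [hneg]
      have hgd' : ∀ j : Int, d'.getD j 0 =
          if j = l ∨ j = -l then
            d.getD j 0 - (if |d0.getD l 0| ≤ |d0.getD (-l) 0| then d0.getD l 0 else d0.getD (-l) 0)
          else d.getD j 0 := by
        intro j
        rw [hstep, PySem.Dict.getD_insert, PySem.Dict.getD_insert]
        have hl0 : l ≠ -l := by omega
        rcases eq_or_ne j (-l) with rfl | hj1
        · simp [hy]
        · rcases eq_or_ne j l with rfl | hj2
          · simp [hj1, hx]
          · simp [hj1, hj2]
      have ihres := ih (fun x hx => hsub x (by simp [hx])) hK.of_cons d' hk'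
        (by
          intro m hm hmpos
          have hml : m ≠ l := by rintro rfl; exact (List.nodup_cons.mp hK).1 hm
          have h1 : m ≠ -l := by omega
          have h2 : -m ≠ l := by omega
          have h3 : -m ≠ -l := by omega
          rw [hgd' m, hgd' (-m)]
          rw [if_neg (by tauto), if_neg (by tauto)]
          exact hpre m (by simp [hm]) hmpos)
      refine ⟨by rw [List.foldl_cons, ← hd']; exact ihres.1, fun j => ?_⟩
      rw [List.foldl_cons, ← hd', ihres.2 j]
      by_cases hjl : |j| = l
      · have hj0 : j ≠ 0 := by
          intro h; rw [h] at hjl; simp at hjl; omega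
        have hnotin : |j| ∉ K := by rw [hjl]; exact (List.nodup_cons.mp hK).1
        have hj : j = l ∨ j = -l := by
          rcases abs_cases j with ⟨h1, _⟩ | ⟨h1, _⟩ <;> omega
        rw [if_neg (by tauto), if_pos ⟨hj0, by simp [hjl], by rw [hjl]; exact hneg⟩]
        rw [hgd' j, if_pos hj, hjl]
      · have hcnd : (j ≠ 0 ∧ |j| ∈ l :: K ∧ -|j| ∈ d0.keys) ↔ (j ≠ 0 ∧ |j| ∈ K ∧ -|j| ∈ d0.keys) := by
          simp only [List.mem_cons]
          constructor
          · rintro ⟨h0, hm | hm, hn⟩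
            · exact absurd hm hjl
            · exact ⟨h0, hm, hn⟩
          · rintro ⟨h0, hm, hn⟩; exact ⟨h0, Or.inr hm, hn⟩
        rw [if_congr hcnd rfl rfl]
        have hdj : d'.getD j 0 = d.getD j 0 := by
          rw [hgd' j, if_neg]
          rintro (rfl | rfl)
          · exact hjl (abs_of_pos hl)
          · apply hjl; rw [abs_neg, abs_of_pos hl]
        rw [hdj]
    · have hd' : pvStepB d l = d := by simp only [pvStepB, if_neg hg]
      have ihres := ih (fun x hx => hsub x (by simp [hx])) hK.of_cons d hkeys
        (fun m hm hmpos => hpre m (by simp [hm]) hmpos)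
      refine ⟨by rw [List.foldl_cons, hd']; exact ihres.1, fun j => ?_⟩
      rw [List.foldl_cons, hd', ihres.2 j]
      by_cases hjl : |j| = l
      · -- the pair for |j| = l is not cancelled: the guard failed for l, so -|j| is no key
        have hnl : ∀ _ : j ≠ 0, -|j| ∉ d0.keys := by
          intro h0 hn
          refine hg ⟨?_, ?_⟩
          · have := abs_nonneg j
            rcases eq_or_lt_of_le this with h | h
            · exfalso; apply h0; simpa using h.symm
            · omega
          · rw [hdc]
            exact decide_eq_true (by rw [← hjl]; exact hn)
        rw [if_neg, if_neg] <;> rintro ⟨h0, _, hn⟩ <;> exact hnl h0 hn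
      · have hcnd : (j ≠ 0 ∧ |j| ∈ l :: K ∧ -|j| ∈ d0.keys) ↔ (j ≠ 0 ∧ |j| ∈ K ∧ -|j| ∈ d0.keys) := by
          simp only [List.mem_cons]
          constructor
          · rintro ⟨h0, hm | hm, hn⟩
            · exact absurd hm hjl
            · exact ⟨h0, hm, hn⟩
          · rintro ⟨h0, hm, hn⟩; exact ⟨h0, Or.inr hm, hn⟩
        rw [if_congr hcnd rfl rfl]

-- the A-side scan over a strictly key-sorted suffix L of the sorted key list, pointwise.
-- closure hypothesis: every key not in L sorts strictly before everything in L.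
theorem pvScanA_spec (d0 : PySem.Dict Int Int) (L : List Int) (d : PySem.Dict Int Int) :
    (∀ l ∈ L, l ∈ d0.keys) → L.Nodup → L.Pairwise (fun u v => pvKeyA u < pvKeyA v) →
    (∀ x ∈ d0.keys, x ∉ L → ∀ u ∈ L, pvKeyA x < pvKeyA u) →
    d.keys = d0.keys → (∀ l ∈ L, d.getD l 0 = d0.getD l 0) →
    (pvScanA L d).keys = d0.keys ∧
    ∀ j : Int, (pvScanA L d).getD j 0 =
      if j ≠ 0 ∧ |j| ∈ L ∧ -|j| ∈ L then
        d.getD j 0 -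
          (if |d0.getD |j| 0| ≤ |d0.getD (-|j|) 0| then d0.getD |j| 0 else d0.getD (-|j|) 0)
      else d.getD j 0 := by
  induction L, d using pvScanA.induct with
  | case1 b rest d vy vx vmw ih =>
    intro hsub hL hsort hclo hkeys hpre
    -- the head is -b, the second element b; sortedness + nodup force b < 0
    have hbneg : b < 0 := by
      rcases lt_trichotomy b 0 with h | h | h
      · exact h
      · exfalso; subst h; simp at hL
      · exfalso
        have h2 := (List.pairwise_cons.mp hsort).1 b (by simp)
        simp only [pvKeyA, abs_neg] at h2
        split_ifs at h2 <;> omega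
    have hmemnb : -b ∈ (-b :: b :: rest) := by simp
    have hmemb : b ∈ (-b :: b :: rest) := by simp
    have hx : d.getD (-b) 0 = d0.getD (-b) 0 := hpre (-b) hmemnb
    have hy : d.getD b 0 = d0.getD b 0 := hpre b hmemb
    have hnbb : (b : Int) ≠ -b := by omega
    set minw := if |d.getD (-b) 0| ≤ |d.getD b 0| then d.getD (-b) 0 else d.getD b 0 with hmw
    set d2 := ((d.modify (-b) 0 fun v => v - minw).modify b 0 fun v => v - minw) with hd2
    have hd2i : d2 = (d.insert (-b) (d.getD (-b) 0 - minw)).insert b (d.getD b 0 - minw) := by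
      rw [hd2]
      simp only [PySem.Dict.modify]
      rw [PySem.Dict.getD_insert, if_neg hnbb]
    have hcnb : d.contains (-b) = true := by
      rw [PySem.Dict.contains_eq_decide_mem_keys, hkeys]
      exact decide_eq_true (hsub (-b) hmemnb)
    have hcb : d.contains b = true := by
      rw [PySem.Dict.contains_eq_decide_mem_keys, hkeys]
      exact decide_eq_true (hsub b hmemb)
    have hk2 : d2.keys = d0.keys := by
      rw [hd2i, PySem.Dict.keys_insert_of_contains, PySem.Dict.keys_insert_of_contains, hkeys]
      · exact hcnb
      · rw [PySem.Dict.contains_insert, hcb]; simp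
    have hgd2 : ∀ j : Int, d2.getD j 0 =
        if j = -b ∨ j = b then d.getD j 0 - minw else d.getD j 0 := by
      intro j
      rw [hd2i, PySem.Dict.getD_insert, PySem.Dict.getD_insert]
      rcases eq_or_ne j b with rfl | hj1
      · simp
      · rcases eq_or_ne j (-b) with rfl | hj2
        · simp [hnbb.symm]
        · simp [hj1, hj2]
    have hnodup2 : rest.Nodup := (hL.of_cons).of_cons
    have hnbrest : -b ∉ rest := by
      have := List.nodup_cons.mp hL
      intro h; exact this.1 (by simp [h])
    have hbrest : b ∉ rest := by
      exact (List.nodup_cons.mp (List.nodup_cons.mp hL).2).1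
    have ihres := ih (fun x hx => hsub x (by simp [hx])) hnodup2
      ((hsort.of_cons).of_cons)
      (by
        intro x hxk hxr u hu
        by_cases hxL : x ∈ (-b :: b :: rest)
        · rcases List.mem_cons.mp hxL with heq | hxL2
          · exact heq ▸ (List.pairwise_cons.mp hsort).1 u (by simp [hu])
          · rcases List.mem_cons.mp hxL2 with heq | hxL3
            · exact heq ▸ (List.pairwise_cons.mp (hsort.of_cons)).1 u hu
            · exact absurd hxL3 hxr
        · exact hclo x hxk hxL u (by simp [hu]))
      hk2
      (by
        intro l hl
        rw [hgd2 l, if_neg]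
        · exact hpre l (by simp [hl])
        · rintro (rfl | rfl)
          · exact hnbrest hl
          · exact hbrest hl)
    have hscan : pvScanA (-b :: b :: rest) d = pvScanA rest d2 := by
      rw [pvScanA]
      simp only [← hmw, ← hd2]
      simp
    refine ⟨by rw [hscan]; exact ihres.1, fun j => ?_⟩
    rw [hscan, ihres.2 j]
    by_cases hjb : |j| = -b
    · have hj0 : j ≠ 0 := by
        intro h; rw [h] at hjb; simp at hjb; omega
      have hj : j = -b ∨ j = b := by
        rcases abs_cases j with ⟨h1, _⟩ | ⟨h1, _⟩ <;> omega
      have hnin : |j| ∉ rest := by rw [hjb]; exact hnbrest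
      rw [if_neg (by tauto), if_pos ⟨hj0, by rw [hjb]; exact hmemnb, by rw [hjb]; simp⟩]
      rw [hgd2 j, if_pos hj, hjb, hmw, hx, hy]
      have hneg : -(-b) = b := by omega
      rw [hneg]
    · have hjnb : |j| ≠ b := by
        have := abs_nonneg j; omega
      have hcnd : (j ≠ 0 ∧ |j| ∈ (-b :: b :: rest) ∧ -|j| ∈ (-b :: b :: rest)) ↔
          (j ≠ 0 ∧ |j| ∈ rest ∧ -|j| ∈ rest) := by
        simp only [List.mem_cons]
        constructor
        · rintro ⟨h0, hm, hn⟩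
          have habs : (0:Int) < |j| := abs_pos.mpr h0
          refine ⟨h0, ?_, ?_⟩
          · rcases hm with h | h | h
            · exact absurd h hjb
            · exact absurd h hjnb
            · exact h
          · rcases hn with h | h | h
            · exfalso; apply hjb; omega
            · exfalso; apply hjnb; omega
            · exact h
        · rintro ⟨h0, hm, hn⟩; exact ⟨h0, Or.inr (Or.inr hm), Or.inr (Or.inr hn)⟩
      rw [if_congr hcnd rfl rfl]
      have hdj : d2.getD j 0 = d.getD j 0 := by
        rw [hgd2 j, if_neg]
        rintro (rfl | rfl)
        · apply hjb; rw [abs_neg, abs_of_neg hbneg]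
        · exact hjb (abs_of_neg hbneg)
      rw [hdj]
  | case2 a b rest d h ih =>
    intro hsub hL hsort hclo hkeys hpre
    have ihres := ih (fun x hx => hsub x (by simp [hx])) hL.of_cons hsort.of_cons
      (by
        intro x hxk hxr u hu
        by_cases hxL : x ∈ (a :: b :: rest)
        · rcases List.mem_cons.mp hxL with rfl | hh
          · exact (List.pairwise_cons.mp hsort).1 u hu
          · exact absurd hh hxr
        · exact hclo x hxk hxL u (by simp [hu]))
      hkeys (fun l hl => hpre l (by simp [hl]))
    have hscan : pvScanA (a :: b :: rest) d = pvScanA (b :: rest) d := by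
      rw [pvScanA]
      simp only [if_neg h]
    refine ⟨by rw [hscan]; exact ihres.1, fun j => ?_⟩
    rw [hscan, ihres.2 j]
    have key1 : ¬ (j ≠ 0 ∧ |j| = a ∧ -|j| ∈ (a :: b :: rest)) := by
      rintro ⟨h0, h1, hn⟩
      have habs : (0:Int) < |j| := abs_pos.mpr h0
      have hapos : 0 < a := h1 ▸ habs
      have hn' : -a ∈ b :: rest := by
        rcases List.mem_cons.mp (h1 ▸ hn) with hh | hh
        · exfalso; omega
        · exact hh
      have hn'' : -a ∈ rest := by
        rcases List.mem_cons.mp hn' with hh | hh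
        · exact absurd (by omega : a = -b) h
        · exact hh
      have h2 : pvKeyA a < pvKeyA b := (List.pairwise_cons.mp hsort).1 b (by simp)
      have h3 : pvKeyA b < pvKeyA (-a) := (List.pairwise_cons.mp hsort.of_cons).1 (-a) hn''
      simp only [pvKeyA, abs_neg] at h2 h3
      rcases abs_cases b with ⟨hb1, _⟩ | ⟨hb1, _⟩ <;> split_ifs at h2 h3 <;> omega
    have key2 : ¬ (j ≠ 0 ∧ -|j| = a ∧ |j| ∈ (a :: b :: rest)) := by
      rintro ⟨h0, h1, hm⟩
      have habs : (0:Int) < |j| := abs_pos.mpr h0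
      have hm' : |j| ∈ b :: rest := by
        rcases List.mem_cons.mp hm with hh | hh
        · exfalso; omega
        · exact hh
      have h2 : pvKeyA a < pvKeyA |j| := (List.pairwise_cons.mp hsort).1 |j| (by simp [hm'])
      rw [← h1] at h2
      simp only [pvKeyA, abs_neg, abs_abs] at h2
      split_ifs at h2 <;> omega
    have hcnd : (j ≠ 0 ∧ |j| ∈ (a :: b :: rest) ∧ -|j| ∈ (a :: b :: rest)) ↔
        (j ≠ 0 ∧ |j| ∈ (b :: rest) ∧ -|j| ∈ (b :: rest)) := by
      constructor
      · rintro ⟨h0, hm, hn⟩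
        refine ⟨h0, ?_, ?_⟩
        · rcases List.mem_cons.mp hm with hh | hh
          · exact absurd ⟨h0, hh, hn⟩ key1
          · exact hh
        · rcases List.mem_cons.mp hn with hh | hh
          · exact absurd ⟨h0, hh, hm⟩ key2
          · exact hh
      · rintro ⟨h0, hm, hn⟩; exact ⟨h0, by simp [hm], by simp [hn]⟩
    rw [if_congr hcnd rfl rfl]
  | case3 t d hne =>
    intro hsub hL hsort hclo hkeys hpre
    rcases t with _ | ⟨x, _ | ⟨y, rest⟩⟩
    · exact ⟨by simp [pvScanA, hkeys], fun j => by simp [pvScanA]⟩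
    · refine ⟨by simp [pvScanA, hkeys], fun j => ?_⟩
      have hno : ¬ (j ≠ 0 ∧ |j| ∈ [x] ∧ -|j| ∈ [x]) := by
        rintro ⟨h0, hm, hn⟩
        have habs : (0:Int) < |j| := abs_pos.mpr h0
        simp at hm hn
        omega
      rw [if_neg hno]
      simp [pvScanA]
    · exact absurd rfl (hne x y rest)

-- ===== VERDICT (by name: the statement is the Claim_ definition above) =====
theorem process_oppo_literals_py_spec : Claim_equal_process_oppo_literals_py := by
  intro wghts _ hpre
  unfold Spec_process_oppo_literals_py
  show (pvScanA (PySem.List.sorted (PySem.Dict.mk wghts).keys pvKeyA false)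
          (PySem.Dict.mk wghts)).items
      = ((PySem.Dict.mk wghts).keys.foldl pvStepB (PySem.Dict.mk wghts)).items
  set d0 := PySem.Dict.mk wghts with hd0
  have hnd : d0.keys.Nodup := by
    rw [hd0, PySem.Dict.keys_mk]
    exact hpre
  set lits := PySem.List.sorted d0.keys pvKeyA false with hlits
  have hperm : lits.Perm d0.keys := PySem.List.sorted_perm d0.keys pvKeyA false
  have hmem : ∀ x : Int, x ∈ lits ↔ x ∈ d0.keys := fun x =>
    PySem.List.mem_sorted d0.keys pvKeyA false x
  have hndl : lits.Nodup := hperm.nodup_iff.mpr hnd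
  have hps : lits.Pairwise (fun u v => pvKeyA u < pvKeyA v) := by
    have hand := (PySem.List.sorted_pairwise d0.keys pvKeyA).and hndl
    rw [← hlits] at hand
    exact hand.imp (fun hab => lt_of_le_of_ne hab.1 (fun he => hab.2 (pvKeyA_inj he)))
  obtain ⟨hkA, hgA⟩ := pvScanA_spec d0 lits d0 (fun l hl => (hmem l).mp hl) hndl hps
    (fun x hxk hxl => absurd ((hmem x).mpr hxk) hxl) rfl (fun l _ => rfl)
  obtain ⟨hkB, hgB⟩ := pvFoldB_spec d0 d0.keys (fun l hl => hl) hnd d0 rfl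
    (fun l _ _ => ⟨rfl, rfl⟩)
  rw [PySem.Dict.items_eq_map_keys (pvScanA lits d0) (by rw [hkA]; exact hnd) 0,
      PySem.Dict.items_eq_map_keys (d0.keys.foldl pvStepB d0) (by rw [hkB]; exact hnd) 0,
      hkA, hkB]
  refine List.map_congr_left (fun j _ => ?_)
  have hcnd : (j ≠ 0 ∧ |j| ∈ lits ∧ -|j| ∈ lits) ↔
      (j ≠ 0 ∧ |j| ∈ d0.keys ∧ -|j| ∈ d0.keys) := by
    simp only [hmem]
  rw [hgA j, hgB j, if_congr hcnd rfl rfl]
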